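-- pv_equiv track=rewrite | github.com/nigelkurgan/animal_work_scripts | allocate_mice_equal.py | assign_round_robin
-- ===== SOURCE A (Python) =====
-- def assign_round_robin(indices, target_sizes, rng):
--     bins = [[] for _ in target_sizes]
--     ptr = 0
--     counts = [0]*len(target_sizes)
--     for i in indices:
--         start = ptr
--         while counts[ptr] >= target_sizes[ptr]:
--             ptr = (ptr + 1) % len(target_sizes)
--             if ptr == start:
--                 raise RuntimeError("No bin has capacity left while assigning.")
--         bins[ptr].append(i)
--         counts[ptr] += 1
--         ptr = (ptr + 1) % len(target_sizes)
--     assignment = {}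
--     for b, idxs in enumerate(bins):
--         for j in idxs:
--             assignment[j] = b
--     return assignment, bins
-- ===== SOURCE B (Python) =====
-- def assign_round_robin(indices, target_sizes, rng):
--     # Round-based: instead of walking a pointer item by item and skipping full
--     # bins, build the visiting order one whole round at a time (each round the
--     # still-active bins in order take one item each), then distribute.
--     n = len(indices)
--     bins = [[] for _ in target_sizes]
--     order = []
--     active = list(range(len(target_sizes)))
--     r = 0
--     while len(order) < n:
--         active = [b for b in active if r < target_sizes[b]]
--         if not active:
--             raise RuntimeError("No bin has capacity left while assigning.")
--         order.extend(active)
--         r += 1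
--     for i, b in zip(indices, order):
--         bins[b].append(i)
--     assignment = {}
--     for b, idxs in enumerate(bins):
--         for j in idxs:
--             assignment[j] = b
--     return assignment, bins
-- ===== Notes on version B (the rewrite author's own statement) =====
-- stated objective: alternative
-- what changed: A walks a pointer item by item, linearly skipping over full bins for every element; B builds the visiting order one whole round at a time over a shrinking list of still-active bins (exhausted bins are dropped once and never rescanned) and then distributes the items by zipping them with that order.
import Mathlib
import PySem

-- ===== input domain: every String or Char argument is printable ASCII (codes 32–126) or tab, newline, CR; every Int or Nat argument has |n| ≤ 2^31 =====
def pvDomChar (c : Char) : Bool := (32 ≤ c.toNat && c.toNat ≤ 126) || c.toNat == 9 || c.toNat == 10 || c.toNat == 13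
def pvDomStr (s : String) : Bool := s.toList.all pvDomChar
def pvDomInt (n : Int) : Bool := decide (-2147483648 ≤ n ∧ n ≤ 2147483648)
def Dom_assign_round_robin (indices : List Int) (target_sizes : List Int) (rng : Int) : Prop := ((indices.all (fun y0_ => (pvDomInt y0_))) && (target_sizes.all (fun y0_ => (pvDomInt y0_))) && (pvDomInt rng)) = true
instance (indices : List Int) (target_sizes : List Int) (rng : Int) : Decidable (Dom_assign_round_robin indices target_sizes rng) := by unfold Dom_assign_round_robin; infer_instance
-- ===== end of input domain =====

-- B replaces A's per-item pointer walk (which re-skips full bins for every element) by a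
-- round-at-a-time order built over a shrinking active-bin list; same results on all inputs
-- where A returns (alternative decomposition, not measured faster).


-- ===== PORT A =====
-- epilogue shared verbatim by both Pythons: assignment = {}; for b, idxs in enumerate(bins): for j in idxs: assignment[j] = b
def mkAssignment (bins : List (List Int)) : List (Int × Int) :=
  ((PySem.List.enumerate bins 0).foldl
    (fun d p => p.2.foldl (fun d j => PySem.Dict.insert d j p.1) d)
    PySem.Dict.empty).items

-- the inner 'while counts[ptr] >= target_sizes[ptr]' walk; fuel bounds the (finite) walk, none = RuntimeError
def scanA (counts targets : List Int) (start : Nat) : Nat → Nat → Option Nat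
  | _, 0 => none
  | ptr, fuel+1 =>
    if targets.getD ptr 0 ≤ counts.getD ptr 0 then
      if (ptr + 1) % targets.length = start then none
      else scanA counts targets start ((ptr + 1) % targets.length) fuel
    else some ptr

def goA (targets : List Int) : List Int → List (List Int) → List Int → Nat → Option (List (List Int))
  | [], bins, _, _ => some bins
  | i :: rest, bins, counts, ptr =>
    match scanA counts targets ptr ptr targets.length with
    | none => none
    | some q => goA targets rest (bins.modify q (· ++ [i])) (counts.modify q (· + 1)) ((q + 1) % targets.length)

def assign_round_robin (indices : List Int) (target_sizes : List Int) (rng : Int) : (List (Int × Int)) × List (List Int) :=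
  match goA target_sizes indices (target_sizes.map fun _ => []) (List.replicate target_sizes.length 0) 0 with
  | none => ([], [])   -- Python raises (RuntimeError / IndexError) here; outside Pre_
  | some bins => (mkAssignment bins, bins)

-- ===== PORT B =====
-- the 'while len(order) < n' loop; state = (r, active, order); fuel bounds the loop, none = RuntimeError
def bGo (targets : List Int) (n : Nat) : Nat → Nat → List Nat → List Nat → Option (List Nat)
  | 0, _, _, order => if n ≤ order.length then some order else none
  | fuel+1, r, active, order =>
    if n ≤ order.length then some order
    else
      let active' := active.filter (fun b => (r : Int) < targets.getD b 0)
      if active' = [] then none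
      else bGo targets n fuel (r + 1) active' (order ++ active')

def assign_round_robin_alt (indices : List Int) (target_sizes : List Int) (rng : Int) : (List (Int × Int)) × List (List Int) :=
  match bGo target_sizes indices.length indices.length 0 (List.range target_sizes.length) [] with
  | none => ([], [])   -- Python raises RuntimeError here; outside Pre_
  | some order =>
    let bins := (indices.zip order).foldl (fun bs ib => bs.modify ib.2 (· ++ [ib.1]))
      (target_sizes.map fun _ => ([] : List Int))
    (mkAssignment bins, bins)

-- ===== PRECONDITION & SPEC =====
-- Pre_ = exactly the inputs where the Python A returns: no items, or at least one bin and
-- enough total (nonnegative) capacity; otherwise A raises RuntimeError (or IndexError for []).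
def Pre_assign_round_robin (indices : List Int) (target_sizes : List Int) (rng : Int) : Prop :=
  indices = [] ∨ (target_sizes ≠ [] ∧ (indices.length : Int) ≤ (target_sizes.map (fun t => max t 0)).sum)

instance (indices : List Int) (target_sizes : List Int) (rng : Int) : Decidable (Pre_assign_round_robin indices target_sizes rng) := by
  unfold Pre_assign_round_robin; infer_instance

def pvWitness_assign_round_robin : List Int × List Int × Int := ([7, 8, 9, 10, 11], [2, 0, 3, 1], 0)

def Spec_assign_round_robin (indices : List Int) (target_sizes : List Int) (rng : Int) (out : (List (Int × Int)) × List (List Int)) : Prop := out = assign_round_robin_alt indices target_sizes rng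
instance (indices : List Int) (target_sizes : List Int) (rng : Int) (out : (List (Int × Int)) × List (List Int)) : Decidable (Spec_assign_round_robin indices target_sizes rng out) := by unfold Spec_assign_round_robin; infer_instance

-- ===== CLAIM (what is proved, stated in full; the proofs are below) =====
def Claim_equal_assign_round_robin : Prop := ∀ (indices : List Int) (target_sizes : List Int) (rng : Int), Dom_assign_round_robin indices target_sizes rng → Pre_assign_round_robin indices target_sizes rng → Spec_assign_round_robin indices target_sizes rng (assign_round_robin indices target_sizes rng)

-- ===== LEMMAS AND PROOFS =====

-- proof-side vocabulary
def openB (targets : List Int) (r b : Nat) : Bool := decide ((r : Int) < targets.getD b 0)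
def roundBins (targets : List Int) (r : Nat) : List Nat := (List.range targets.length).filter (openB targets r)
def rounds (targets : List Int) : Nat → Nat → List Nat
  | 0, _ => []
  | f+1, r => roundBins targets r ++ rounds targets f (r + 1)
def ordFrom (targets : List Int) (fuel r p : Nat) : List Nat :=
  (roundBins targets r).filter (fun b => p ≤ b) ++ rounds targets fuel (r + 1)
def si (targets : List Int) (r p b : Nat) : Int :=
  min (if b < p then (r : Int) + 1 else (r : Int)) (max (targets.getD b 0) 0)
def stageList (targets : List Int) (r p : Nat) : List Int := (List.range targets.length).map (si targets r p)
def notFull (counts targets : List Int) (b : Nat) : Bool := !decide (targets.getD b 0 ≤ counts.getD b 0)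
def binStep (bs : List (List Int)) (ib : Int × Nat) : List (List Int) := bs.modify ib.2 (· ++ [ib.1])

theorem scanA_L2 (counts targets : List Int) (start : Nat) :
    ∀ (k ptr fuel : Nat), ptr + k = start → 0 < k → start < targets.length → k ≤ fuel →
      scanA counts targets start ptr fuel = ((List.range' ptr k).filter (notFull counts targets)).head? := by
  intro k
  induction k with
  | zero => intro ptr fuel _ h0 _ _; omega
  | succ j ih =>
    intro ptr fuel hsum hpos hstart hfuel
    cases fuel with
    | zero => omega
    | succ f =>
      rw [List.range'_succ]
      by_cases hfull : targets.getD ptr 0 ≤ counts.getD ptr 0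
      · have hnf : ¬ notFull counts targets ptr = true := by
          rw [notFull, decide_eq_true hfull]; simp
        rw [List.filter_cons_of_neg hnf]
        have hmod : (ptr + 1) % targets.length = ptr + 1 := Nat.mod_eq_of_lt (by omega)
        simp only [scanA, if_pos hfull, hmod]
        by_cases heq : ptr + 1 = start
        · have hj : j = 0 := by omega
          subst hj
          rw [if_pos heq]
          simp
        · rw [if_neg heq]
          exact ih (ptr + 1) f (by omega) (by omega) hstart (by omega)
      · have hnf : notFull counts targets ptr = true := by
          rw [notFull, decide_eq_false hfull]; rfl
        rw [List.filter_cons_of_pos hnf, List.head?_cons]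
        simp only [scanA, if_neg hfull]

theorem scanA_L1 (counts targets : List Int) (start : Nat) :
    ∀ (d ptr fuel : Nat), ptr + d = targets.length → 0 < d → start ≤ ptr → start < targets.length →
      d + start ≤ fuel →
      scanA counts targets start ptr fuel =
        (((List.range' ptr d).filter (notFull counts targets)).head?).or
          (((List.range start).filter (notFull counts targets)).head?) := by
  intro d
  induction d with
  | zero => intro ptr fuel _ h0 _ _ _; omega
  | succ j ih =>
    intro ptr fuel hsum hpos hle hstart hfuel
    cases fuel with
    | zero => omega
    | succ f =>
      rw [List.range'_succ]
      by_cases hfull : targets.getD ptr 0 ≤ counts.getD ptr 0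
      · have hnf : ¬ notFull counts targets ptr = true := by
          rw [notFull, decide_eq_true hfull]; simp
        rw [List.filter_cons_of_neg hnf]
        by_cases hj : j = 0
        · subst hj
          -- ptr is the last position; wrap to 0
          have hmod : (ptr + 1) % targets.length = 0 := by
            have h1 : ptr + 1 = targets.length := by omega
            rw [h1, Nat.mod_self]
          simp only [scanA, if_pos hfull, hmod]
          by_cases hs0 : start = 0
          · subst hs0
            simp
          · rw [if_neg (fun h => hs0 h.symm)]
            have h2 := scanA_L2 counts targets start start 0 f (by omega) (by omega) hstart (by omega)
            rw [h2, List.range_eq_range']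
            simp
        · have hmod : (ptr + 1) % targets.length = ptr + 1 := Nat.mod_eq_of_lt (by omega)
          simp only [scanA, if_pos hfull, hmod]
          rw [if_neg (show ¬ ptr + 1 = start by omega)]
          exact ih (ptr + 1) f (by omega) (by omega) (by omega) hstart (by omega)
      · have hnf : notFull counts targets ptr = true := by
          rw [notFull, decide_eq_false hfull]; rfl
        rw [List.filter_cons_of_pos hnf, List.head?_cons]
        simp only [scanA, if_neg hfull]
        rfl

theorem scanA_spec (counts targets : List Int) (p : Nat) (hp : p < targets.length) :
    scanA counts targets p p targets.length =
      (((List.range' p (targets.length - p)).filter (notFull counts targets)).head?).or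
        (((List.range p).filter (notFull counts targets)).head?) := by
  exact scanA_L1 counts targets p (targets.length - p) p targets.length (by omega) (by omega) le_rfl hp (by omega)

theorem getD_stageList (targets : List Int) (r p b : Nat) (hb : b < targets.length) :
    (stageList targets r p).getD b 0 = si targets r p b := by
  simp [stageList, List.getD, List.getElem?_map, List.getElem?_range, hb]

theorem notFull_stage_ge (targets : List Int) (r p b : Nat) (hb : b < targets.length) (hpb : p ≤ b) :
    notFull (stageList targets r p) targets b = openB targets r b := by
  rw [notFull, getD_stageList targets r p b hb, si, openB]
  have hnb : ¬ b < p := by omega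
  rw [if_neg hnb, ← decide_not]
  apply decide_eq_decide.mpr
  have hr : (0 : Int) ≤ (r : Int) := Int.natCast_nonneg r
  omega

theorem notFull_stage_lt (targets : List Int) (r p b : Nat) (hb : b < targets.length) (hpb : b < p) :
    notFull (stageList targets r p) targets b = openB targets (r + 1) b := by
  rw [notFull, getD_stageList targets r p b hb, si, openB]
  rw [if_pos hpb, ← decide_not]
  apply decide_eq_decide.mpr
  have hr : (0 : Int) ≤ (r : Int) := Int.natCast_nonneg r
  push_cast
  omega

theorem roundBins_split (targets : List Int) (r p : Nat) (hp : p ≤ targets.length) :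
    (roundBins targets r).filter (fun b => p ≤ b) =
      (List.range' p (targets.length - p)).filter (openB targets r) := by
  rw [roundBins, List.filter_filter]
  have h0 := (List.range'_append (s := 0) (m := p) (n := targets.length - p) (step := 1))
  simp only [Nat.zero_add, Nat.one_mul] at h0
  have hsplit : List.range targets.length = List.range' 0 p ++ List.range' p (targets.length - p) := by
    have hpl : p + (targets.length - p) = targets.length := by omega
    calc List.range targets.length = List.range' 0 (p + (targets.length - p)) := by
          rw [List.range_eq_range', hpl]
      _ = List.range' 0 p ++ List.range' p (targets.length - p) := h0.symm
  rw [hsplit, List.filter_append]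
  have h1 : (List.range' 0 p).filter (fun b => decide (p ≤ b) && openB targets r b) = [] := by
    rw [List.filter_eq_nil_iff]
    intro a ha
    have : a < p := by
      rcases List.mem_range'.mp ha with ⟨i, hi, rfl⟩
      omega
    simp [show ¬ p ≤ a by omega]
  rw [h1, List.nil_append]
  apply List.filter_congr
  intro x hx
  rcases List.mem_range'.mp hx with ⟨i, hi, rfl⟩
  simp [show p ≤ p + 1 * i by omega]

theorem openB_mono (targets : List Int) (r r' b : Nat) (h : r ≤ r') (ho : openB targets r' b = true) :
    openB targets r b = true := by
  simp only [openB, decide_eq_true_eq] at *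
  have : (r : Int) ≤ (r' : Int) := by exact_mod_cast h
  omega

theorem roundBins_pairwise (targets : List Int) (r : Nat) : (roundBins targets r).Pairwise (· < ·) :=
  List.Pairwise.sublist List.filter_sublist List.pairwise_lt_range

theorem filter_tail_of_head (l : List Nat) (hl : l.Pairwise (· < ·)) (p c : Nat) (tl : List Nat)
    (h : l.filter (fun b => p ≤ b) = c :: tl) :
    l.filter (fun b => c + 1 ≤ b) = tl := by
  have hpc : p ≤ c := by
    have hc : c ∈ l.filter (fun b => p ≤ b) := by rw [h]; exact List.mem_cons_self
    have := List.of_mem_filter hc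
    simpa using this
  have hstep : l.filter (fun b => c + 1 ≤ b) = (l.filter (fun b => p ≤ b)).filter (fun b => c + 1 ≤ b) := by
    rw [List.filter_filter]
    apply List.filter_congr
    intro x _
    by_cases hx : c + 1 ≤ x
    · simp [hx, show p ≤ x by omega]
    · simp [hx]
  rw [hstep, h, List.filter_cons_of_neg (by simp), List.filter_eq_self.mpr]
  intro a ha
  have hpw : (c :: tl).Pairwise (· < ·) := by
    rw [← h]
    exact List.Pairwise.sublist List.filter_sublist hl
  have := (List.pairwise_cons.mp hpw).1 a ha
  simp; omega

theorem roundBins_empty_succ (targets : List Int) (r : Nat) (h : roundBins targets r = []) :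
    roundBins targets (r + 1) = [] := by
  rw [roundBins, List.filter_eq_nil_iff] at *
  intro a ha hop
  exact h a ha (openB_mono targets r (r + 1) a (by omega) hop)

theorem rounds_eq_nil (targets : List Int) : ∀ (f r : Nat), roundBins targets r = [] → rounds targets f r = [] := by
  intro f
  induction f with
  | zero => intro r _; rfl
  | succ g ih =>
    intro r h
    rw [rounds, h, List.nil_append]
    exact ih (r + 1) (roundBins_empty_succ targets r h)

theorem rounds_append_one (targets : List Int) : ∀ (f r : Nat),
    rounds targets (f + 1) r = rounds targets f r ++ roundBins targets (r + f) := by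
  intro f
  induction f with
  | zero => intro r; simp [rounds]
  | succ g ih =>
    intro r
    rw [rounds, ih (r + 1), show r + (g + 1) = r + 1 + g from by omega, rounds, List.append_assoc]

theorem stage_update_a (targets : List Int) (r p b0 : Nat) (hb0 : b0 < targets.length) (hp : p ≤ b0)
    (ho : openB targets r b0 = true) (hmin : ∀ b, p ≤ b → b < b0 → openB targets r b = false) :
    (stageList targets r p).modify b0 (· + 1) = stageList targets r (b0 + 1) := by
  apply List.ext_getElem
  · simp [stageList]
  intro b h1 h2
  rw [List.getElem_modify]
  simp only [stageList, List.getElem_map, List.getElem_range] at *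
  have hr : (0 : Int) ≤ (r : Int) := Int.natCast_nonneg r
  have hop : (r : Int) < targets.getD b0 0 := by simpa [openB] using ho
  by_cases hbb : b0 = b
  · subst hbb
    rw [if_pos rfl, si, si, if_neg (by omega), if_pos (by omega)]
    omega
  · rw [if_neg hbb, si, si]
    rcases Nat.lt_or_ge b p with hcase | hcase
    · rw [if_pos hcase, if_pos (by omega)]
    · rcases Nat.lt_or_ge b b0 with hcase2 | hcase2
      · have hcl : ¬ ((r : Int) < targets.getD b 0) := by
          have := hmin b hcase hcase2
          simpa [openB] using this
        rw [if_neg (by omega), if_pos (by omega)]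
        omega
      · rw [if_neg (by omega), if_neg (by omega)]

theorem stage_update_b (targets : List Int) (r p b1 : Nat) (hp : p < targets.length) (hb1 : b1 < p)
    (ho : openB targets (r + 1) b1 = true)
    (hmin : ∀ b, b < b1 → openB targets (r + 1) b = false)
    (hclosed : ∀ b, p ≤ b → b < targets.length → openB targets r b = false) :
    (stageList targets r p).modify b1 (· + 1) = stageList targets (r + 1) (b1 + 1) := by
  apply List.ext_getElem
  · simp [stageList]
  intro b h1 h2
  rw [List.getElem_modify]
  simp only [stageList, List.getElem_map, List.getElem_range] at *
  have hr : (0 : Int) ≤ (r : Int) := Int.natCast_nonneg r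
  have hop : ((r : Int) + 1) < targets.getD b1 0 := by
    have := ho; simp only [openB, decide_eq_true_eq] at this; push_cast at this; omega
  by_cases hbb : b1 = b
  · subst hbb
    rw [if_pos rfl, si, si, if_pos (by omega), if_pos (by omega)]
    push_cast
    omega
  · rw [if_neg hbb, si, si]
    rcases Nat.lt_or_ge b b1 with hcase | hcase
    · have hcl : ¬ ((r : Int) + 1 < targets.getD b 0) := by
        have := hmin b hcase; simp only [openB, decide_eq_false_iff_not, decide_eq_true_eq] at this
        push_cast at this; omega
      rw [if_pos (by omega), if_pos (by omega)]
      push_cast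
      omega
    · rcases Nat.lt_or_ge b p with hcase2 | hcase2
      · rw [if_pos hcase2, if_neg (by omega)]
        push_cast
        omega
      · have hbm : b < targets.length := by
          simpa [stageList, List.length_modify] using h1
        have hcl : ¬ ((r : Int) < targets.getD b 0) := by
          have := hclosed b hcase2 hbm; simp only [openB, decide_eq_false_iff_not, decide_eq_true_eq] at this
          omega
        rw [if_neg (by omega), if_neg (by omega)]
        push_cast
        omega

theorem stage_norm (targets : List Int) (r : Nat) :
    stageList targets r targets.length = stageList targets (r + 1) 0 := by
  apply List.ext_getElem
  · simp [stageList]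
  intro b h1 h2
  have hbm : b < targets.length := by simpa [stageList] using h1
  simp only [stageList, List.getElem_map, List.getElem_range] at *
  rw [si, si, if_pos (by omega), if_neg (by omega)]
  push_cast
  ring_nf

theorem stage_init (targets : List Int) :
    stageList targets 0 0 = List.replicate targets.length 0 := by
  apply List.ext_getElem
  · simp [stageList]
  intro b h1 h2
  simp only [stageList, List.getElem_map, List.getElem_range, List.getElem_replicate] at *
  rw [si, if_neg (by omega)]
  simp

theorem range_split (m p : Nat) (h : p ≤ m) :
    List.range m = List.range' 0 p ++ List.range' p (m - p) := by
  have h0 := (List.range'_append (s := 0) (m := p) (n := m - p) (step := 1))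
  simp only [Nat.zero_add, Nat.one_mul] at h0
  have hpl : p + (m - p) = m := by omega
  calc List.range m = List.range' 0 (p + (m - p)) := by rw [List.range_eq_range', hpl]
    _ = List.range' 0 p ++ List.range' p (m - p) := h0.symm

theorem mem_roundBins (targets : List Int) (r b : Nat) :
    b ∈ roundBins targets r ↔ b < targets.length ∧ openB targets r b = true := by
  simp [roundBins, List.mem_filter, List.mem_range]

theorem head_min (l : List Nat) (hl : l.Pairwise (· < ·)) (c : Nat) (tl : List Nat)
    (h : l = c :: tl) (b : Nat) (hb : b ∈ l) (hlt : b < c) : False := by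
  subst h
  rcases List.mem_cons.mp hb with rfl | hb'
  · omega
  · have := (List.pairwise_cons.mp hl).1 b hb'
    omega

theorem roundBins_succ_eq (targets : List Int) (r p : Nat) (hp : p ≤ targets.length)
    (hT : (roundBins targets r).filter (fun b => p ≤ b) = []) :
    roundBins targets (r + 1) = (List.range p).filter (openB targets (r + 1)) := by
  have hTm : ∀ b, p ≤ b → b < targets.length → openB targets r b = false := by
    intro b hpb hbm
    by_contra hbad
    have hbop : openB targets r b = true := by
      cases hq : openB targets r b
      · exact absurd hq hbad
      · rfl
    have hmem : b ∈ (roundBins targets r).filter (fun b => p ≤ b) := by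
      rw [List.mem_filter]
      exact ⟨(mem_roundBins targets r b).mpr ⟨hbm, hbop⟩, by simpa using hpb⟩
    rw [hT] at hmem
    exact absurd hmem (List.not_mem_nil)
  rw [roundBins, range_split targets.length p hp, List.filter_append]
  have h2 : (List.range' p (targets.length - p)).filter (openB targets (r + 1)) = [] := by
    rw [List.filter_eq_nil_iff]
    intro a ha hop
    rcases List.mem_range'.mp ha with ⟨i2, hi2, rfl⟩
    have h3 := openB_mono targets r (r + 1) (p + 1 * i2) (by omega) hop
    have h4 := hTm (p + 1 * i2) (by omega) (by omega)
    rw [h4] at h3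
    exact Bool.false_ne_true h3
  rw [h2, List.append_nil, List.range_eq_range']

theorem core (targets : List Int) :
    ∀ (idxs : List Int) (fuel r p : Nat) (bins : List (List Int)), p < targets.length →
      idxs.length ≤ (ordFrom targets fuel r p).length →
      goA targets idxs bins (stageList targets r p) p =
        some ((idxs.zip (ordFrom targets fuel r p)).foldl binStep bins) := by
  intro idxs
  induction idxs with
  | nil => intro fuel r p bins hp _; simp [goA]
  | cons i rest ih =>
    intro fuel r p bins hp hlen
    have hscan := scanA_spec (stageList targets r p) targets p hp
    have hfil1 : (List.range' p (targets.length - p)).filter (notFull (stageList targets r p) targets)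
        = (roundBins targets r).filter (fun b => p ≤ b) := by
      rw [roundBins_split targets r p (by omega)]
      apply List.filter_congr
      intro x hx
      rcases List.mem_range'.mp hx with ⟨i2, hi2, rfl⟩
      exact notFull_stage_ge targets r p _ (by omega) (by omega)
    have hfil2 : (List.range p).filter (notFull (stageList targets r p) targets)
        = (List.range p).filter (openB targets (r + 1)) := by
      apply List.filter_congr
      intro x hx
      have hxp : x < p := List.mem_range.mp hx
      exact notFull_stage_lt targets r p x (by omega) hxp
    rw [hfil1, hfil2] at hscan
    rcases hT : (roundBins targets r).filter (fun b => p ≤ b) with _ | ⟨b0, tl⟩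
    · -- no open bin at round r at or after p: wrap into round r+1
      rw [hT, List.head?_nil, Option.none_or] at hscan
      have hrb1 := roundBins_succ_eq targets r p (by omega) hT
      rcases hS : (List.range p).filter (openB targets (r + 1)) with _ | ⟨b1, tl1⟩
      · -- nothing open at round r+1 either: capacity exhausted, contradicts hlen
        exfalso
        rw [hS] at hrb1
        have hord : ordFrom targets fuel r p = [] := by
          rw [ordFrom, hT, List.nil_append]
          exact rounds_eq_nil targets fuel (r + 1) hrb1
        rw [hord] at hlen
        simp at hlen
      · rw [hS, List.head?_cons] at hscan
        rw [hS] at hrb1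
        have hb1p : b1 < p := by
          have : b1 ∈ (List.range p).filter (openB targets (r + 1)) := by rw [hS]; exact List.mem_cons_self
          have := (List.mem_filter.mp this).1
          exact List.mem_range.mp this
        have hb1op : openB targets (r + 1) b1 = true := by
          have : b1 ∈ roundBins targets (r + 1) := by rw [hrb1]; exact List.mem_cons_self
          exact ((mem_roundBins targets (r + 1) b1).mp this).2
        have hmin : ∀ b, b < b1 → openB targets (r + 1) b = false := by
          intro b hb
          cases hq : openB targets (r + 1) b
          · rfl
          · exfalso
            exact head_min (roundBins targets (r + 1)) (roundBins_pairwise targets (r + 1)) b1 tl1 hrb1 b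
              ((mem_roundBins targets (r + 1) b).mpr ⟨by omega, hq⟩) hb
        have hclosed : ∀ b, p ≤ b → b < targets.length → openB targets r b = false := by
          intro b hpb hbm
          cases hq : openB targets r b
          · rfl
          · exfalso
            have hmem : b ∈ (roundBins targets r).filter (fun b => p ≤ b) := by
              rw [List.mem_filter]
              exact ⟨(mem_roundBins targets r b).mpr ⟨hbm, hq⟩, by simpa using hpb⟩
            rw [hT] at hmem
            exact absurd hmem (List.not_mem_nil)
        -- take the step
        simp only [goA, hscan]
        rw [stage_update_b targets r p b1 hp hb1p hb1op hmin hclosed]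
        have hmod : (b1 + 1) % targets.length = b1 + 1 := Nat.mod_eq_of_lt (by omega)
        rw [hmod]
        cases fuel with
        | zero =>
          exfalso
          rw [ordFrom, hT, List.nil_append] at hlen
          simp [rounds] at hlen
        | succ f =>
          have htl1 : (roundBins targets (r + 1)).filter (fun b => b1 + 1 ≤ b) = tl1 := by
            apply filter_tail_of_head (roundBins targets (r + 1)) (roundBins_pairwise targets (r + 1)) 0 b1 tl1
            rw [List.filter_eq_self.mpr (by intro a _; simp)]
            exact hrb1
          have hord : ordFrom targets (f + 1) r p = b1 :: ordFrom targets f (r + 1) (b1 + 1) := by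
            rw [ordFrom, hT, List.nil_append, rounds, hrb1, ordFrom, htl1]
            rfl
          rw [hord, List.zip_cons_cons, List.foldl_cons]
          exact ih f (r + 1) (b1 + 1) (binStep bins (i, b1)) (by omega)
            (by rw [hord] at hlen; simpa using hlen)
    · -- open bin b0 ≥ p in round r
      rw [hT, List.head?_cons, Option.some_or] at hscan
      have hb0T : b0 ∈ (roundBins targets r).filter (fun b => p ≤ b) := by
        rw [hT]; exact List.mem_cons_self
      have hb0rb : b0 ∈ roundBins targets r := (List.mem_filter.mp hb0T).1
      have hb0m : b0 < targets.length := ((mem_roundBins targets r b0).mp hb0rb).1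
      have hb0op : openB targets r b0 = true := ((mem_roundBins targets r b0).mp hb0rb).2
      have hpb0 : p ≤ b0 := by
        have := (List.mem_filter.mp hb0T).2; simpa using this
      have hpw : ((roundBins targets r).filter (fun b => p ≤ b)).Pairwise (· < ·) :=
        List.Pairwise.sublist List.filter_sublist (roundBins_pairwise targets r)
      have hmin : ∀ b, p ≤ b → b < b0 → openB targets r b = false := by
        intro b hpb hb
        cases hq : openB targets r b
        · rfl
        · exfalso
          apply head_min _ hpw b0 tl hT b _ hb
          rw [List.mem_filter]
          exact ⟨(mem_roundBins targets r b).mpr ⟨by omega, hq⟩, by simpa using hpb⟩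
      have htl : (roundBins targets r).filter (fun b => b0 + 1 ≤ b) = tl :=
        filter_tail_of_head (roundBins targets r) (roundBins_pairwise targets r) p b0 tl hT
      simp only [goA, hscan]
      rw [stage_update_a targets r p b0 hb0m hpb0 hb0op hmin]
      by_cases hlast : b0 + 1 < targets.length
      · have hmod : (b0 + 1) % targets.length = b0 + 1 := Nat.mod_eq_of_lt hlast
        rw [hmod]
        have hord : ordFrom targets fuel r p = b0 :: ordFrom targets fuel r (b0 + 1) := by
          rw [ordFrom, hT, ordFrom, htl]
          rfl
        rw [hord, List.zip_cons_cons, List.foldl_cons]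
        exact ih fuel r (b0 + 1) (binStep bins (i, b0)) hlast
          (by rw [hord] at hlen; simpa using hlen)
      · -- b0 was the last bin: wrap to position 0, next round
        have hb0last : b0 + 1 = targets.length := by omega
        have htlnil : tl = [] := by
          rw [List.eq_nil_iff_forall_not_mem]
          intro x hx
          have hxT : x ∈ (roundBins targets r).filter (fun b => p ≤ b) := by
            rw [hT]; exact List.mem_cons_of_mem b0 hx
          have hxm : x < targets.length := ((mem_roundBins targets r x).mp (List.mem_filter.mp hxT).1).1
          have := (List.pairwise_cons.mp (hT ▸ hpw)).1 x hx
          omega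
        have hmod : (b0 + 1) % targets.length = 0 := by rw [hb0last, Nat.mod_self]
        rw [hmod, hb0last, stage_norm]
        have hord : ordFrom targets fuel r p = b0 :: rounds targets fuel (r + 1) := by
          rw [ordFrom, hT, htlnil]
          rfl
        rw [hord, List.zip_cons_cons, List.foldl_cons]
        cases fuel with
        | zero =>
          have hr0 : rounds targets 0 (r + 1) = [] := rfl
          rw [hr0]
          have hlen2 : rest.length + 1 ≤ 1 := by
            rw [hord, hr0] at hlen
            simpa using hlen
          have hrest : rest = [] := List.eq_nil_of_length_eq_zero (by omega)
          subst hrest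
          simp [goA, binStep]
        | succ f =>
          have hord2 : rounds targets (f + 1) (r + 1) = ordFrom targets f (r + 1) 0 := by
            rw [rounds, ordFrom, List.filter_eq_self.mpr (by intro a _; simp)]
          rw [hord2]
          exact ih f (r + 1) 0 (binStep bins (i, b0)) (by omega)
            (by rw [hord, hord2] at hlen; simpa using hlen)

theorem roundBins_filter_succ (targets : List Int) (r : Nat) :
    (roundBins targets r).filter (openB targets (r + 1)) = roundBins targets (r + 1) := by
  rw [roundBins, roundBins, List.filter_filter]
  apply List.filter_congr
  intro b _
  cases hq : openB targets (r + 1) b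
  · simp
  · rw [openB_mono targets r (r + 1) b (by omega) hq]
    simp

theorem bGo_prefix (targets : List Int) (n : Nat) :
    ∀ (fuel r : Nat) (active order o : List Nat),
      active.filter (openB targets r) = roundBins targets r →
      bGo targets n fuel r active order = some o →
      n ≤ o.length ∧ ∃ tl, o ++ tl = order ++ rounds targets fuel r := by
  intro fuel
  induction fuel with
  | zero =>
    intro r active order o hact h
    rw [bGo] at h
    by_cases hc : n ≤ order.length
    · rw [if_pos hc] at h
      cases h
      exact ⟨hc, [], by simp [rounds]⟩
    · rw [if_neg hc] at h
      cases h
  | succ f ih =>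
    intro r active order o hact h
    rw [bGo] at h
    by_cases hc : n ≤ order.length
    · rw [if_pos hc] at h
      cases h
      exact ⟨hc, rounds targets (f + 1) r, by simp⟩
    · rw [if_neg hc] at h
      have hact' : active.filter (fun b => decide ((r : Int) < targets.getD b 0)) = roundBins targets r := hact
      rw [hact'] at h
      by_cases hnil : roundBins targets r = []
      · rw [if_pos hnil] at h
        cases h
      · rw [if_neg hnil] at h
        obtain ⟨h1, tl, h2⟩ := ih (r + 1) (roundBins targets r) (order ++ roundBins targets r) o
          (roundBins_filter_succ targets r) h
        refine ⟨h1, tl, ?_⟩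
        rw [h2, rounds, List.append_assoc]

theorem bGo_isSome (targets : List Int) (n : Nat) :
    ∀ (fuel r : Nat) (active order : List Nat),
      active.filter (openB targets r) = roundBins targets r →
      n ≤ order.length + (rounds targets fuel r).length →
      (bGo targets n fuel r active order).isSome := by
  intro fuel
  induction fuel with
  | zero =>
    intro r active order hact hn
    rw [bGo, if_pos (by simpa [rounds] using hn)]
    rfl
  | succ f ih =>
    intro r active order hact hn
    rw [bGo]
    by_cases hc : n ≤ order.length
    · rw [if_pos hc]; rfl
    · rw [if_neg hc]
      have hact' : active.filter (fun b => decide ((r : Int) < targets.getD b 0)) = roundBins targets r := hact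
      rw [hact']
      by_cases hnil : roundBins targets r = []
      · exfalso
        have : rounds targets (f + 1) r = [] := rounds_eq_nil targets (f + 1) r hnil
        rw [this] at hn
        simp at hn
        omega
      · rw [if_neg hnil]
        apply ih (r + 1) (roundBins targets r) (order ++ roundBins targets r)
          (roundBins_filter_succ targets r)
        rw [rounds, List.length_append] at hn
        rw [List.length_append]
        omega

theorem length_filter_range (m : Nat) (p : Nat → Bool) :
    ((List.range m).filter p).length = ∑ b ∈ Finset.range m, (if p b then 1 else 0) := by
  induction m with
  | zero => simp
  | succ k ih =>
    rw [List.range_succ, List.filter_append, List.length_append, ih, Finset.sum_range_succ]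
    by_cases h : p k <;> simp [h]

theorem rounds_length_ge (targets : List Int) :
    ∀ (F r : Nat), min F (∑ b ∈ Finset.range targets.length, (targets.getD b 0 - (r : Int)).toNat)
      ≤ (rounds targets F r).length := by
  intro F
  induction F with
  | zero => intro r; simp
  | succ F ih =>
    intro r
    have hlen : (rounds targets (F + 1) r).length
        = (roundBins targets r).length + (rounds targets F (r + 1)).length := by
      rw [rounds, List.length_append]
    have hrb : (roundBins targets r).length
        = ∑ b ∈ Finset.range targets.length, (if openB targets r b then 1 else 0) :=
      length_filter_range targets.length (openB targets r)
    have hpt : ∑ b ∈ Finset.range targets.length, (targets.getD b 0 - (r : Int)).toNat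
        ≤ (roundBins targets r).length
          + ∑ b ∈ Finset.range targets.length, (targets.getD b 0 - ((r : Int) + 1)).toNat := by
      rw [hrb, ← Finset.sum_add_distrib]
      apply Finset.sum_le_sum
      intro b _
      by_cases h : openB targets r b = true
      · have hb : (r : Int) < targets.getD b 0 := by simpa [openB] using h
        rw [if_pos h]
        omega
      · have hb : ¬ (r : Int) < targets.getD b 0 := by simpa [openB] using h
        rw [if_neg h]
        omega
    have hih := ih (r + 1)
    push_cast at hih
    by_cases hS : (∑ b ∈ Finset.range targets.length, (targets.getD b 0 - ((r : Int) + 1)).toNat) ≤ F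
    · omega
    · have hpos : 0 < ∑ b ∈ Finset.range targets.length, (targets.getD b 0 - ((r : Int) + 1)).toNat := by
        omega
      have hex : ∃ b ∈ Finset.range targets.length, 0 < (targets.getD b 0 - ((r : Int) + 1)).toNat := by
        by_contra hno
        push_neg at hno
        have hz : ∑ b ∈ Finset.range targets.length, (targets.getD b 0 - ((r : Int) + 1)).toNat = 0 :=
          Finset.sum_eq_zero (fun b hb => by have := hno b hb; omega)
        omega
      obtain ⟨b, hb, hbpos⟩ := hex
      have hbm : b ∈ roundBins targets r := by
        apply (mem_roundBins targets r b).mpr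
        refine ⟨Finset.mem_range.mp hb, ?_⟩
        simp only [openB, decide_eq_true_eq]
        omega
      have hrb1 : 0 < (roundBins targets r).length := List.length_pos_of_mem hbm
      omega

theorem cap_eq (targets : List Int) :
    ((targets.map (fun t => max t 0)).sum : Int)
      = ((∑ b ∈ Finset.range targets.length, (targets.getD b 0).toNat : Nat) : Int) := by
  induction targets with
  | nil => simp
  | cons a l ih =>
    rw [List.map_cons, List.sum_cons, ih, List.length_cons, Finset.sum_range_succ']
    push_cast
    have h0 : ∀ b : Nat, ((a :: l).getD (b + 1) 0) = l.getD b 0 := fun b => rfl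
    simp only [h0, List.getD_cons_zero]
    have : ((a.toNat : Int)) = max a 0 := Int.ofNat_toNat a
    omega

theorem zip_prefix {α β : Type} : ∀ (l : List α) (o tl : List β), l.length ≤ o.length →
    l.zip (o ++ tl) = l.zip o := by
  intro l
  induction l with
  | nil => intro o tl _; simp
  | cons a l ih =>
    intro o tl h
    cases o with
    | nil => simp at h
    | cons b o => simpa using ih o tl (by simpa using h)

-- ===== VERDICT (by name: the statement is the Claim_ definition above) =====
theorem assign_round_robin_spec : Claim_equal_assign_round_robin := by
  unfold Claim_equal_assign_round_robin
  intro indices targets rng _ hpre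
  unfold Spec_assign_round_robin
  rcases hpre with hnil | ⟨hne, hcap⟩
  · subst hnil
    rfl
  · have hm : 0 < targets.length := List.length_pos_of_ne_nil hne
    have hcapN : indices.length ≤ ∑ b ∈ Finset.range targets.length, (targets.getD b 0).toNat := by
      rw [cap_eq targets] at hcap
      exact_mod_cast hcap
    have hact0 : (List.range targets.length).filter (openB targets 0) = roundBins targets 0 := rfl
    have hklen : indices.length ≤ (rounds targets indices.length 0).length := by
      have h1 := rounds_length_ge targets indices.length 0
      have h2 : ∑ b ∈ Finset.range targets.length, (targets.getD b 0 - ((0 : Nat) : Int)).toNat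
          = ∑ b ∈ Finset.range targets.length, (targets.getD b 0).toNat := by
        apply Finset.sum_congr rfl
        intro b _
        norm_num
      rw [h2] at h1
      omega
    have hsome := bGo_isSome targets indices.length indices.length 0 (List.range targets.length) [] hact0
      (by simpa using hklen)
    obtain ⟨o, ho⟩ := Option.isSome_iff_exists.mp hsome
    obtain ⟨holen, tl, htl⟩ := bGo_prefix targets indices.length indices.length 0 _ _ _ hact0 ho
    simp only [List.nil_append] at htl
    have hord00 : ordFrom targets indices.length 0 0 = o ++ (tl ++ roundBins targets indices.length) := by
      rw [ordFrom, List.filter_eq_self.mpr (by intro a _; simp), ← List.append_assoc, htl]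
      have h3 := rounds_append_one targets indices.length 0
      rw [rounds] at h3
      simpa using h3
    have hcore := core targets indices indices.length 0 0 (targets.map fun _ => ([] : List Int)) hm
      (by rw [hord00]; simp; omega)
    rw [stage_init targets] at hcore
    simp only [assign_round_robin, assign_round_robin_alt, hcore, ho]
    rw [hord00, zip_prefix indices o (tl ++ roundBins targets indices.length) (by omega)]
    rfl
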